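-- pv_equiv track=rewrite | github.com/joaoavf/connect-x | kaggle/iebot_v2_submission.py | analyze_column
-- ===== SOURCE A (Python) =====
-- def analyze_column(column):
--     top_piece, counter, num_spaces = 0, 0, 0
--
--     for value in column:
--
--         if value > 0:
--
--             if top_piece == 0:
--                 top_piece = value
--                 counter += 1
--
--             elif value == top_piece:
--                 counter += 1
--
--             else:
--                 break
--         else:
--             num_spaces += 1
--
--     return top_piece, counter, num_spaces
-- ===== SOURCE B (Python) =====
-- def analyze_column(column):
--     col = list(column)
--     top_piece = next((v for v in col if v > 0), 0)
--     stop = next((i for i, v in enumerate(col) if v > 0 and v != top_piece), len(col))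
--     pre = col[:stop]
--     counter = pre.count(top_piece) if top_piece > 0 else 0
--     num_spaces = sum(1 for v in pre if v <= 0)
--     return top_piece, counter, num_spaces
-- ===== Notes on version B (the rewrite author's own statement) =====
-- stated objective: alternative
-- what changed: B replaces A's single stateful discover-and-count loop by index/slice arithmetic: it finds the top piece, computes the stop index of the scanned prefix, slices it, and obtains the counter and space count with count/sum over that slice; A mutates loop state and breaks.
import Mathlib
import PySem

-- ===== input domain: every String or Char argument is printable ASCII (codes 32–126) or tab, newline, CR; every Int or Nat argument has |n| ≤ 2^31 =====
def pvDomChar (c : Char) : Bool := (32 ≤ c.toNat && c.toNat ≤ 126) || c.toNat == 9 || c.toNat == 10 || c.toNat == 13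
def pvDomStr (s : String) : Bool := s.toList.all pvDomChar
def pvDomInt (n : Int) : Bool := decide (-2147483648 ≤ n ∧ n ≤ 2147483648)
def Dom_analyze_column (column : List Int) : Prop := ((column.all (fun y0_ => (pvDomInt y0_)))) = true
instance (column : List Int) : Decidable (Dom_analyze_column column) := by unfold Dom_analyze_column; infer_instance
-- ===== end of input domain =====

-- B replaces A's single stateful discover-and-count loop by index/slice arithmetic:
-- find the top piece, find the stop index of the scanned prefix, then count on that
-- prefix with count/countP (objective: alternative decomposition, same O(n) cost).

-- ===== PORT A =====
-- A's for-loop with break, as structural recursion over the same state (top, counter, spaces)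
def analyzeLoopA (l : List Int) (top counter spaces : Int) : Int × Int × Int :=
  match l with
  | [] => (top, counter, spaces)
  | v :: rest =>
    if v > 0 then
      if top = 0 then analyzeLoopA rest v (counter + 1) spaces
      else if v = top then analyzeLoopA rest top (counter + 1) spaces
      else (top, counter, spaces)
    else analyzeLoopA rest top counter (spaces + 1)

def analyze_column (column : List Int) : Int × Int × Int :=
  analyzeLoopA column 0 0 0

-- ===== PORT B =====
-- Source B: top_piece = next((v for v in col if v > 0), 0)
def firstPos (l : List Int) : Int :=
  match l with
  | [] => 0
  | v :: rest => if v > 0 then v else firstPos rest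

-- Source B: stop = next((i for i, v in enumerate(col) if v > 0 and v != top), len(col))
def stopIdx (top : Int) (l : List Int) : Nat :=
  match l with
  | [] => 0
  | v :: rest => if v > 0 && v != top then 0 else stopIdx top rest + 1

def analyze_column_alt (column : List Int) : Int × Int × Int :=
  let top := firstPos column
  let pre := column.take (stopIdx top column)   -- col[:stop], stop ∈ [0, len]
  let counter : Int := if top > 0 then (pre.count top : Int) else 0
  let num_spaces : Int := (pre.countP (fun v => decide (v ≤ 0)) : Int)
  (top, counter, num_spaces)

-- ===== PRECONDITION & SPEC =====
def Spec_analyze_column (column : List Int) (out : Int × Int × Int) : Prop := out = analyze_column_alt column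
instance (column : List Int) (out : Int × Int × Int) : Decidable (Spec_analyze_column column out) := by unfold Spec_analyze_column; infer_instance

-- ===== CLAIM (what is proved, stated in full; the proofs are below) =====
def Claim_equal_analyze_column : Prop := ∀ (column : List Int), Dom_analyze_column column → Spec_analyze_column column (analyze_column column)

-- ===== LEMMAS AND PROOFS =====

-- once the top piece is fixed (positive), A's loop returns the counts over the scanned prefix
theorem loopA_pos (top : Int) (htop : 0 < top) (l : List Int) :
    ∀ (c s : Int), analyzeLoopA l top c s =
      (top, c + ((l.take (stopIdx top l)).count top : Int),
            s + ((l.take (stopIdx top l)).countP (fun v => decide (v ≤ 0)) : Int)) := by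
  induction l with
  | nil => intro c s; simp [analyzeLoopA, stopIdx]
  | cons v rest ih =>
    intro c s
    by_cases hv : v > 0
    · by_cases he : v = top
      · subst he
        have hst : stopIdx v (v :: rest) = stopIdx v rest + 1 := by simp [stopIdx]
        simp only [analyzeLoopA, if_pos hv, if_neg (by omega : ¬ v = 0)]
        rw [ih (c + 1) s, hst, List.take_succ_cons]
        simp [show ¬ v ≤ 0 by omega]
        omega
      · have hst : stopIdx top (v :: rest) = 0 := by simp [stopIdx, hv, he]
        simp only [analyzeLoopA, if_pos hv, if_neg (by omega : ¬ top = 0), if_neg he]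
        rw [hst]
        simp
    · have hst : stopIdx top (v :: rest) = stopIdx top rest + 1 := by
        simp [stopIdx, hv]
      simp only [analyzeLoopA, if_neg hv]
      rw [ih c (s + 1), hst, List.take_succ_cons]
      simp [show ¬ v = top by omega, show v ≤ 0 by omega]
      omega

-- the full run, starting with top = 0
theorem loopA_zero (l : List Int) :
    ∀ (c s : Int), analyzeLoopA l 0 c s =
      (firstPos l,
       (if 0 < firstPos l then c + ((l.take (stopIdx (firstPos l) l)).count (firstPos l) : Int) else c),
       s + ((l.take (stopIdx (firstPos l) l)).countP (fun v => decide (v ≤ 0)) : Int)) := by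
  induction l with
  | nil => intro c s; simp [analyzeLoopA, firstPos, stopIdx]
  | cons v rest ih =>
    intro c s
    by_cases hv : v > 0
    · -- top piece discovered: firstPos (v::rest) = v
      have hfp : firstPos (v :: rest) = v := by simp [firstPos, hv]
      have hst : stopIdx v (v :: rest) = stopIdx v rest + 1 := by simp [stopIdx]
      simp only [analyzeLoopA, if_pos hv]
      rw [loopA_pos v hv rest (c + 1) s, hfp, hst, List.take_succ_cons]
      simp [hv, show ¬ v ≤ 0 by omega]
      omega
    · -- a space: recurse with same top = 0
      have hfp : firstPos (v :: rest) = firstPos rest := by simp [firstPos, hv]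
      have hst : stopIdx (firstPos rest) (v :: rest) = stopIdx (firstPos rest) rest + 1 := by
        simp [stopIdx, hv]
      simp only [analyzeLoopA, if_neg hv]
      rw [ih c (s + 1), hfp, hst, List.take_succ_cons]
      by_cases h0 : 0 < firstPos rest
      · simp [h0, show ¬ v = firstPos rest by omega,
             show v ≤ 0 by omega]
        omega
      · simp [h0, show v ≤ 0 by omega]
        omega

-- ===== VERDICT (by name: the statement is the Claim_ definition above) =====
theorem analyze_column_spec : Claim_equal_analyze_column := by
  intro column _
  unfold Spec_analyze_column analyze_column analyze_column_alt
  rw [loopA_zero column 0 0]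
  by_cases h : 0 < firstPos column <;> simp [h]
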